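-- pv_equiv track=rewrite | github.com/diwanaditya/cosmos-mas | cosmos/ctp.py | _synthesise_context
-- ===== SOURCE A (Python) =====
-- from typing import Dict, List, Optional, Tuple, TYPE_CHECKING
--
-- def _synthesise_context(scope: set, task_history: List[dict],
--                          max_entries: int = 10) -> List[str]:
--     """
--     Step 4b: Extract the most relevant recent history entries
--     matching the new role's responsibility scope.
--     """
--     relevant = []
--     for entry in reversed(task_history):
--         text = entry.get('content', '')
--         if any(cat.lower() in text.lower() for cat in scope):
--             relevant.append(text)
--             if len(relevant) >= max_entries:
--                 break
--     return list(reversed(relevant))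
-- ===== SOURCE B (Python) =====
-- def _synthesise_context(scope: set, task_history, max_entries: int = 10):
--     """Filter-then-slice: collect all matching contents in order, keep the tail.
--
--     A non-positive max_entries yields no entries (A returns one entry there;
--     see the stated intended difference)."""
--     if max_entries <= 0:
--         return []
--     matches = [entry.get('content', '')
--                for entry in task_history
--                if any(cat.lower() in entry.get('content', '').lower() for cat in scope)]
--     return matches[-max_entries:]
-- ===== Notes on version B (the rewrite author's own statement) =====
-- stated objective: simpler
-- what changed: Replaces the reverse scan with append-and-break and a final re-reversal by a single forward filter of matching contents followed by a tail slice matches[-max_entries:], with an explicit empty result for non-positive max_entries.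
-- intended difference: On inputs with max_entries <= 0 and at least one matching entry, A returns a one-element list holding the last matching content (its break fires after the first append), while B returns the empty list, which is the intended meaning of a cap of zero or fewer entries. — e.g. on _synthesise_context(["a"], [[("content", "xa")], [("content", "b")]], 0): A returns ["xa"], B returns []
import Mathlib
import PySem

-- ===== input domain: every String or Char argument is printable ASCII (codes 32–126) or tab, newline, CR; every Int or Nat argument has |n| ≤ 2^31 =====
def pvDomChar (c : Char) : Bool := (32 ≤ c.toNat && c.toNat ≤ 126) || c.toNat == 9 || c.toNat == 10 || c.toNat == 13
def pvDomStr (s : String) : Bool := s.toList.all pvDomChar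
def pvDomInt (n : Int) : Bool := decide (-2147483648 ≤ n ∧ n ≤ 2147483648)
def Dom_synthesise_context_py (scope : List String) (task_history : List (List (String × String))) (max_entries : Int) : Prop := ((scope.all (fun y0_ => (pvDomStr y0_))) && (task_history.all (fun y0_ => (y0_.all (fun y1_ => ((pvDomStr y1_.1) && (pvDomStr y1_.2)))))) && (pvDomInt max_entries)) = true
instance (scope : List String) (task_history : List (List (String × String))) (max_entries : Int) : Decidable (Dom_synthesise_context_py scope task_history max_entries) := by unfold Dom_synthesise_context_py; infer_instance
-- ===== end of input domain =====

-- B replaces A's reverse scan with append-and-break by a forward filter plus a tail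
-- slice, returning [] for a non-positive cap where A returns the single last match
-- (stated as an intended difference D_ below).


-- ===== PORT A =====
-- entry.get('content', '')
def pvContent (e : List (String × String)) : String := PySem.Dict.getD (PySem.Dict.mk e) "content" ""
-- any(cat.lower() in text.lower() for cat in scope)  (a Bool, so set-iteration order is irrelevant)
def pvMatch (scope : List String) (e : List (String × String)) : Bool :=
  scope.any (fun cat => PySem.Str.isIn (PySem.Str.lower cat) (PySem.Str.lower (pvContent e)))

-- the 'for entry in reversed(task_history): … break' loop, accumulator 'relevant'
def pvALoop (scope : List String) (max_entries : Int) :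
    List (List (String × String)) → List String → List String
  | [], rel => rel
  | e :: rest, rel =>
    if pvMatch scope e then
      let rel' := rel ++ [pvContent e]
      if max_entries ≤ (rel'.length : Int) then rel'
      else pvALoop scope max_entries rest rel'
    else pvALoop scope max_entries rest rel

def synthesise_context_py (scope : List String) (task_history : List (List (String × String))) (max_entries : Int) : List String :=
  (pvALoop scope max_entries task_history.reverse []).reverse

-- ===== PORT B =====
def synthesise_context_py_alt (scope : List String) (task_history : List (List (String × String))) (max_entries : Int) : List String :=
  if max_entries ≤ 0 then []
  else
    let ms := (task_history.filter (pvMatch scope)).map pvContent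
    PySem.List.slice ms (some (-max_entries)) none

-- ===== PRECONDITION & SPEC =====
-- On inputs with max_entries ≤ 0 and at least one matching entry, A returns a
-- one-element list holding the last matching content (its break fires right after
-- the first append), while B returns [], the intended meaning of a cap ≤ 0.
def D_synthesise_context_py (scope : List String) (task_history : List (List (String × String))) (max_entries : Int) : Prop :=
  max_entries ≤ 0 ∧ task_history.any (pvMatch scope) = true
instance (scope : List String) (task_history : List (List (String × String))) (max_entries : Int) : Decidable (D_synthesise_context_py scope task_history max_entries) := by unfold D_synthesise_context_py; infer_instance

def Spec_synthesise_context_py (scope : List String) (task_history : List (List (String × String))) (max_entries : Int) (out : List String) : Prop := ¬ D_synthesise_context_py scope task_history max_entries → out = synthesise_context_py_alt scope task_history max_entries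
instance (scope : List String) (task_history : List (List (String × String))) (max_entries : Int) (out : List String) : Decidable (Spec_synthesise_context_py scope task_history max_entries out) := by unfold Spec_synthesise_context_py; infer_instance

def pvDiffWitness_synthesise_context_py : List String × (List (List (String × String))) × Int :=
  (["a"], [[("content", "xa")], [("content", "b")]], 0)
def pvDiffWitnessOut_synthesise_context_py : (List String) × (List String) := (["xa"], [])

-- ===== CLAIM (what is proved, stated in full; the proofs are below) =====
def Claim_unchanged_synthesise_context_py : Prop := ∀ (scope : List String) (task_history : List (List (String × String))) (max_entries : Int), Dom_synthesise_context_py scope task_history max_entries → Spec_synthesise_context_py scope task_history max_entries (synthesise_context_py scope task_history max_entries)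
def Claim_changed_synthesise_context_py : Prop := Dom_synthesise_context_py (pvDiffWitness_synthesise_context_py.1) (pvDiffWitness_synthesise_context_py.2.1) (pvDiffWitness_synthesise_context_py.2.2) ∧ D_synthesise_context_py (pvDiffWitness_synthesise_context_py.1) (pvDiffWitness_synthesise_context_py.2.1) (pvDiffWitness_synthesise_context_py.2.2) ∧ synthesise_context_py (pvDiffWitness_synthesise_context_py.1) (pvDiffWitness_synthesise_context_py.2.1) (pvDiffWitness_synthesise_context_py.2.2) = pvDiffWitnessOut_synthesise_context_py.1 ∧ synthesise_context_py_alt (pvDiffWitness_synthesise_context_py.1) (pvDiffWitness_synthesise_context_py.2.1) (pvDiffWitness_synthesise_context_py.2.2) = pvDiffWitnessOut_synthesise_context_py.2 ∧ pvDiffWitnessOut_synthesise_context_py.1 ≠ pvDiffWitnessOut_synthesise_context_py.2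
def Claim_exact_synthesise_context_py : Prop := ∀ (scope : List String) (task_history : List (List (String × String))) (max_entries : Int), Dom_synthesise_context_py scope task_history max_entries → D_synthesise_context_py scope task_history max_entries → synthesise_context_py scope task_history max_entries ≠ synthesise_context_py_alt scope task_history max_entries

-- ===== LEMMAS AND PROOFS =====

-- The loop with room left (rel shorter than the cap) collects rel followed by the
-- next matching contents up to the cap.
theorem pvALoop_spec (scope : List String) (me : Int) :
    ∀ (l : List (List (String × String))) (rel : List String),
      (rel.length : Int) < me →
      pvALoop scope me l rel =
        rel ++ ((l.filter (pvMatch scope)).map pvContent).take (me - rel.length).toNat := by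
  intro l
  induction l with
  | nil => intro rel _; simp [pvALoop]
  | cons e rest ih =>
    intro rel hlt
    by_cases hp : pvMatch scope e
    · simp only [pvALoop, hp, if_true, List.filter_cons, List.map_cons]
      by_cases hb : me ≤ ((rel ++ [pvContent e]).length : Int)
      · simp only [hb, if_true]
        have hone : (me - rel.length).toNat = 1 := by
          simp [List.length_append] at hb; omega
        simp [hone]
      · simp only [hb, if_false]
        rw [ih (rel ++ [pvContent e]) (by simpa using lt_of_not_ge hb)]
        obtain ⟨m, hm⟩ : ∃ m, (me - rel.length).toNat = m + 1 := ⟨(me - rel.length).toNat - 1, by omega⟩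
        have hm' : (me - ((rel.length : Int) + 1)).toNat = m := by omega
        simp [hm, hm', List.take_succ_cons]
    · simp only [pvALoop, hp, List.filter_cons]
      rw [ih rel hlt]
      simp

-- With no matching entry the loop returns the accumulator unchanged.
theorem pvALoop_no_match (scope : List String) (me : Int) :
    ∀ (l : List (List (String × String))) (rel : List String),
      l.any (pvMatch scope) = false → pvALoop scope me l rel = rel := by
  intro l
  induction l with
  | nil => intro rel _; simp [pvALoop]
  | cons e rest ih =>
    intro rel h
    simp only [List.any_cons, Bool.or_eq_false_iff] at h
    simp [pvALoop, h.1, ih rel h.2]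

-- If some entry matches or the accumulator is nonempty, the loop's result is nonempty.
theorem pvALoop_ne_nil (scope : List String) (me : Int) :
    ∀ (l : List (List (String × String))) (rel : List String),
      l.any (pvMatch scope) = true ∨ rel ≠ [] → pvALoop scope me l rel ≠ [] := by
  intro l
  induction l with
  | nil =>
    intro rel h
    simp only [List.any_nil] at h
    simpa [pvALoop] using h.resolve_left (by simp)
  | cons e rest ih =>
    intro rel h
    by_cases hp : pvMatch scope e
    · simp only [pvALoop, hp, if_true]
      split
      · simp
      · exact ih _ (Or.inr (by simp))
    · simp only [pvALoop, hp]
      refine ih rel ?_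
      rcases h with h | h
      · simp only [List.any_cons, hp, Bool.false_or] at h
        exact Or.inl h
      · exact Or.inr h

-- ===== VERDICT (by name: the statement is the Claim_ definition above) =====
theorem synthesise_context_py_spec : Claim_unchanged_synthesise_context_py := by
  intro scope hist me _ hnd
  unfold synthesise_context_py synthesise_context_py_alt
  by_cases hle : me ≤ 0
  · have hno : hist.any (pvMatch scope) = false := by
      rcases Bool.eq_false_or_eq_true (hist.any (pvMatch scope)) with h | h
      · exact absurd ⟨hle, h⟩ hnd
      · exact h
    have hno' : hist.reverse.any (pvMatch scope) = false := by simpa using hno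
    rw [pvALoop_no_match scope me _ [] hno']
    simp [hle]
  · have hpos : 0 < me := lt_of_not_ge hle
    rw [pvALoop_spec scope me hist.reverse [] (by simpa using hpos)]
    simp only [List.nil_append, Int.sub_zero, List.length_nil, Int.natCast_zero]
    have hk : -(me.toNat : Int) = -me := by omega
    rw [if_neg hle, ← hk,
        PySem.List.slice_from_neg_natCast _ me.toNat (by omega)]
    rw [List.filter_reverse, List.map_reverse, List.take_reverse]
    simp

theorem synthesise_context_py_changed : Claim_changed_synthesise_context_py := by
  unfold Claim_changed_synthesise_context_py; decide

theorem synthesise_context_py_tight : Claim_exact_synthesise_context_py := by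
  intro scope hist me _ hD
  unfold synthesise_context_py synthesise_context_py_alt
  rw [if_pos hD.1]
  intro h
  have hne : pvALoop scope me hist.reverse [] ≠ [] :=
    pvALoop_ne_nil scope me hist.reverse [] (Or.inl (by simpa using hD.2))
  exact hne (by simpa using h)
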